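-- pv_equiv track=rewrite | github.com/Agentic-Environmental-Engineering/GymVerse | gem/gem/envs/example/code_CodeCoveragePlanner_ShortestPathEnv_GEM_env.py | _solve_min_set_cover_size
-- ===== SOURCE A (Python) =====
-- from typing import Tuple, Dict, Any, Optional, List, Set
--
-- def _solve_min_set_cover_size(required: Set[str], cover_map: Dict[str, Set[str]]) -> int:
--     tests = list(cover_map.keys())
--     n = len(tests)
--     # Brute force by increasing cardinality
--     for k in range(1, n + 1):
--         # Early pruning is minimal; full combinatorial acceptable at these sizes
--         indices = list(range(n))
--         # Generate combinations iteratively to avoid importing itertools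
--         combo = [i for i in range(k)]
--         while True:
--             union = set()
--             for idx in combo:
--                 union |= cover_map[tests[idx]]
--             if required.issubset(union):
--                 return k
--             # Next combination in lexicographic order
--             pos = k - 1
--             while pos >= 0 and combo[pos] == n - k + pos:
--                 pos -= 1
--             if pos < 0:
--                 break
--             combo[pos] += 1
--             for j in range(pos + 1, k):
--                 combo[j] = combo[j - 1] + 1
--     return n + 1  # Should not happen if feasible; treated as very large
-- ===== SOURCE B (Python) =====
-- def _solve_min_set_cover_size(required, cover_map):
--     # Exhaustive include/exclude recursion over the test sets; prunes as soon
--     # as everything required is covered (returns 0 more sets needed there).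
--     sets = list(cover_map.values())
--     n = len(sets)
--
--     def best(i, covered):
--         if covered >= set(required):
--             return 0
--         if i == n:
--             return n + 1  # infeasible sentinel
--         skip = best(i + 1, covered)
--         take = 1 + best(i + 1, covered | set(sets[i]))
--         return skip if skip <= take else take
--
--     return best(0, set())
-- ===== Notes on version B (the rewrite author's own statement) =====
-- stated objective: alternative
-- what changed: A enumerates k-combinations of tests for growing k with a hand-rolled lexicographic successor loop; B is a single include/exclude recursion over the list of test sets that returns the minimum covering-subset size directly (returning 0 as soon as the accumulated union covers required).
-- intended difference: When required is empty, A returns 1 (it never considers the empty combination; with no tests it returns n+1=1) while B returns 0, the size of the true minimum cover (no test is needed). — e.g. on _solve_min_set_cover_size([], []): A returns 1, B returns 0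
import Mathlib
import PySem

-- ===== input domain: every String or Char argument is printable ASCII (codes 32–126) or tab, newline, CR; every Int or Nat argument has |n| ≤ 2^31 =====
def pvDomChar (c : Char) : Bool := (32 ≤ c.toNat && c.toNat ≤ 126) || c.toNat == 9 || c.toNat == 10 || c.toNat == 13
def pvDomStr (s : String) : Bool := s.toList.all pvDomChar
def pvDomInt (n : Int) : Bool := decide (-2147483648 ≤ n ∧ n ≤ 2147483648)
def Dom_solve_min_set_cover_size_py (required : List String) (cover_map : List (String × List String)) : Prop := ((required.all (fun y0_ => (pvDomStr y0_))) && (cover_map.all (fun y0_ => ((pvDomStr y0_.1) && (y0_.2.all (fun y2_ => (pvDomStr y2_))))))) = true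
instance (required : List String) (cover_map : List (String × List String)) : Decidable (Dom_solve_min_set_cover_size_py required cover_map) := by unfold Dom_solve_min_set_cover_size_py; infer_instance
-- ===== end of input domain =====

-- B replaces A's staged enumeration of k-combinations (hand-rolled lexicographic successor)
-- by a single include/exclude recursion over the test sets returning the minimum cover size
-- directly; on empty `required` A returns 1 while B returns the intended 0 (see D_ below).

-- ===== PORT A =====
-- inner `while pos >= 0 and combo[pos] == n - k + pos: pos -= 1` (none = pos went below 0)
def pvScanPos (n k : Nat) (combo : List Nat) : Nat → Option Nat
  | 0 => if combo.getD 0 0 = n - k + 0 then none else some 0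
  | p + 1 => if combo.getD (p+1) 0 = n - k + (p+1) then pvScanPos n k combo p else some (p+1)

-- `combo[pos] += 1; for j in range(pos+1, k): combo[j] = combo[j-1] + 1` (none = `break`)
def pvNextCombo (n k : Nat) (combo : List Nat) : Option (List Nat) :=
  match pvScanPos n k combo (k - 1) with
  | none => none
  | some pos =>
      let c1 := combo.set pos (combo.getD pos 0 + 1)
      some ((List.range' (pos+1) (k - (pos+1))).foldl (fun c j => c.set j (c.getD (j-1) 0 + 1)) c1)

-- the `while True` loop of A; fuel is a termination guard only ((n+1)^k provably suffices)
def pvLoopA (required : List String) (d : PySem.Dict String (List String)) (tests : List String)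
    (n k : Nat) : Nat → List Nat → Bool
  | 0, _ => false
  | fuel + 1, combo =>
      let union := combo.foldl (fun u idx => PySem.Set.union u (d.getD (tests.getD idx "") [])) PySem.Set.empty
      if PySem.Set.issubset required union then true
      else match pvNextCombo n k combo with
           | none => false
           | some c' => pvLoopA required d tests n k fuel c'

-- `for k in range(1, n + 1): ...` with early return; falls through to `return n + 1`
def pvOuterA (required : List String) (d : PySem.Dict String (List String)) (tests : List String)
    (n : Nat) : List Nat → Int
  | [] => (n : Int) + 1
  | k :: ks =>
      if pvLoopA required d tests n k ((n+1)^k) (List.range k) then (k : Int)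
      else pvOuterA required d tests n ks

def solve_min_set_cover_size_py (required : List String) (cover_map : List (String × List String)) : Int :=
  let d := PySem.Dict.ofList cover_map
  let tests := d.keys
  let n := tests.length
  pvOuterA required d tests n ((List.range n).map (· + 1))

-- ===== PORT B =====
-- include/exclude recursion of Source B: `best(i, covered)` over the suffix of `sets` from i
def pvBest (required : List String) (ntot : Nat) : List (List String) → PySem.Set String → Int
  | sets, covered =>
    if PySem.Set.issubset required covered then 0
    else
      match sets with
      | [] => (ntot : Int) + 1
      | s :: ss =>
          let skip := pvBest required ntot ss covered
          let take := 1 + pvBest required ntot ss (PySem.Set.union covered s)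
          if skip ≤ take then skip else take

def solve_min_set_cover_size_py_alt (required : List String) (cover_map : List (String × List String)) : Int :=
  let d := PySem.Dict.ofList cover_map
  let sets := d.values
  pvBest required sets.length sets PySem.Set.empty

-- ===== PRECONDITION & SPEC =====
-- When required is empty, A returns 1 (it never considers the empty combination; with no tests
-- it returns n+1 = 1) while B returns 0, the size of the true minimum cover (no test is needed).
def D_solve_min_set_cover_size_py (required : List String) (cover_map : List (String × List String)) : Prop := required = []
instance (required : List String) (cover_map : List (String × List String)) : Decidable (D_solve_min_set_cover_size_py required cover_map) := by unfold D_solve_min_set_cover_size_py; infer_instance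

def Spec_solve_min_set_cover_size_py (required : List String) (cover_map : List (String × List String)) (out : Int) : Prop := ¬ D_solve_min_set_cover_size_py required cover_map → out = solve_min_set_cover_size_py_alt required cover_map
instance (required : List String) (cover_map : List (String × List String)) (out : Int) : Decidable (Spec_solve_min_set_cover_size_py required cover_map out) := by unfold Spec_solve_min_set_cover_size_py; infer_instance

def pvDiffWitness_solve_min_set_cover_size_py : List String × (List (String × List String)) := ([], [])
def pvDiffWitnessOut_solve_min_set_cover_size_py : Int × Int := (1, 0)

-- ===== CLAIM (what is proved, stated in full; the proofs are below) =====
def Claim_unchanged_solve_min_set_cover_size_py : Prop := ∀ (required : List String) (cover_map : List (String × List String)), Dom_solve_min_set_cover_size_py required cover_map → Spec_solve_min_set_cover_size_py required cover_map (solve_min_set_cover_size_py required cover_map)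
def Claim_changed_solve_min_set_cover_size_py : Prop := Dom_solve_min_set_cover_size_py (pvDiffWitness_solve_min_set_cover_size_py.1) (pvDiffWitness_solve_min_set_cover_size_py.2) ∧ D_solve_min_set_cover_size_py (pvDiffWitness_solve_min_set_cover_size_py.1) (pvDiffWitness_solve_min_set_cover_size_py.2) ∧ solve_min_set_cover_size_py (pvDiffWitness_solve_min_set_cover_size_py.1) (pvDiffWitness_solve_min_set_cover_size_py.2) = pvDiffWitnessOut_solve_min_set_cover_size_py.1 ∧ solve_min_set_cover_size_py_alt (pvDiffWitness_solve_min_set_cover_size_py.1) (pvDiffWitness_solve_min_set_cover_size_py.2) = pvDiffWitnessOut_solve_min_set_cover_size_py.2 ∧ pvDiffWitnessOut_solve_min_set_cover_size_py.1 ≠ pvDiffWitnessOut_solve_min_set_cover_size_py.2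
def Claim_exact_solve_min_set_cover_size_py : Prop := ∀ (required : List String) (cover_map : List (String × List String)), Dom_solve_min_set_cover_size_py required cover_map → D_solve_min_set_cover_size_py required cover_map → solve_min_set_cover_size_py required cover_map ≠ solve_min_set_cover_size_py_alt required cover_map

-- ===== LEMMAS AND PROOFS =====

-- `c` is a valid k-combination of indices below n (strictly increasing, in range)
def pvValid (n k : Nat) (c : List Nat) : Prop :=
  c.length = k ∧ c.Pairwise (· < ·) ∧ ∀ x ∈ c, x < n

-- `x` is covered by the sets selected by the index list `c`
def pvCovIdx (required : List String) (sets : List (List String)) (c : List Nat) : Prop :=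
  ∀ x ∈ required, ∃ i ∈ c, x ∈ sets.getD i []

-- `x` is covered by `u` together with the sets of `S`
def pvCovBy (required : List String) (u : List String) (S : List (List String)) : Prop :=
  ∀ x ∈ required, x ∈ u ∨ ∃ s ∈ S, x ∈ s

-- pvSuccAt: the successor combination built by the inner loop, described directly
def pvSuccAt (c : List Nat) (pos : Nat) : List Nat :=
  c.take pos ++ (List.range (c.length - pos)).map (fun t => c.getD pos 0 + 1 + t)

-- base-(n+1) encoding of a combination (lexicographic rank bound)
def pvEnc (B : Nat) (c : List Nat) : Nat := c.foldl (fun a d => a * B + d) 0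

-- reachability by repeated successor steps
inductive pvReach (n k : Nat) : Nat → List Nat → List Nat → Prop
  | refl (c : List Nat) : pvReach n k 0 c c
  | step {c c' g : List Nat} {t : Nat} (h : pvNextCombo n k c = some c')
      (htail : pvReach n k t c' g) : pvReach n k (t+1) c g

theorem pv_mem_foldl_union {α : Type} (g : α → List String) :
    ∀ (l : List α) (u0 : PySem.Set String) (x : String),
      (x ∈ l.foldl (fun u i => PySem.Set.union u (g i)) u0) ↔ x ∈ u0 ∨ ∃ i ∈ l, x ∈ g i := by
  intro l
  induction l with
  | nil => simp
  | cons a l ih =>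
    intro u0 x
    simp only [List.foldl_cons, ih, PySem.Set.mem_union, List.mem_cons]
    constructor
    · rintro ((h | h) | ⟨i, hi, hx⟩)
      · exact Or.inl h
      · exact Or.inr ⟨a, Or.inl rfl, h⟩
      · exact Or.inr ⟨i, Or.inr hi, hx⟩
    · rintro (h | ⟨i, (rfl | hi), hx⟩)
      · exact Or.inl (Or.inl h)
      · exact Or.inl (Or.inr hx)
      · exact Or.inr ⟨i, hi, hx⟩

theorem pv_keys_values_length {κ ν : Type} [BEq κ] (d : PySem.Dict κ ν) :
    d.keys.length = d.values.length := by
  simp [PySem.Dict.keys, PySem.Dict.values]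

theorem pv_getset_eq (cm : List (String × List String)) (idx : Nat)
    (h : idx < (PySem.Dict.ofList cm).keys.length) :
    (PySem.Dict.ofList cm).getD ((PySem.Dict.ofList cm).keys.getD idx "") []
      = (PySem.Dict.ofList cm).values.getD idx [] := by
  set d := PySem.Dict.ofList cm with hd
  have hkeys : d.keys = d.items.map (·.1) := rfl
  have hvals : d.values = d.items.map (·.2) := rfl
  have hlen : idx < d.items.length := by
    simpa [hkeys] using h
  have hmem : (d.items[idx].1, d.items[idx].2) ∈ d.items := by
    simp only [Prod.mk.eta]; exact List.getElem_mem hlen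
  have := PySem.Dict.getD_of_mem_items d hmem (PySem.Dict.nodup_keys_ofList cm) []
  rw [hkeys, hvals]
  rw [List.getD_eq_getElem _ _ (by simpa using hlen), List.getD_eq_getElem _ _ (by simpa using hlen)]
  simpa using this


theorem pv_incr_getD {c : List Nat} (hp : c.Pairwise (· < ·)) :
    ∀ i j, i ≤ j → j < c.length → c.getD i 0 + (j - i) ≤ c.getD j 0 := by
  have key : ∀ i j, i < j → j < c.length → c.getD i 0 < c.getD j 0 := by
    intro i j hij hj
    have hi : i < c.length := lt_trans hij hj
    rw [List.getD_eq_getElem _ _ hi, List.getD_eq_getElem _ _ hj]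
    exact List.pairwise_iff_getElem.mp hp i j hi hj hij
  intro i j hij hj
  induction j with
  | zero => interval_cases i; simp
  | succ m ih =>
    rcases Nat.eq_or_lt_of_le hij with rfl | hlt
    · simp
    · have h1 := ih (by omega) (by omega)
      have h2 := key m (m+1) (by omega) hj
      omega

theorem pv_valid_bound {n k : Nat} {c : List Nat} (hv : pvValid n k c) (hkn : k ≤ n) :
    ∀ i, i < k → c.getD i 0 ≤ n - k + i := by
  obtain ⟨hlen, hp, hb⟩ := hv
  intro i hi
  have hk1 : k - 1 < c.length := by omega
  have h1 := pv_incr_getD hp i (k-1) (by omega) hk1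
  have h2 : c.getD (k-1) 0 < n := by
    apply hb
    rw [List.getD_eq_getElem _ _ hk1]
    exact List.getElem_mem hk1
  omega

theorem pv_scan_some {n k : Nat} {c : List Nat} :
    ∀ {p q : Nat}, pvScanPos n k c p = some q →
    q ≤ p ∧ c.getD q 0 ≠ n - k + q ∧ ∀ j, q < j → j ≤ p → c.getD j 0 = n - k + j := by
  intro p
  induction p with
  | zero =>
    intro q h
    simp only [pvScanPos] at h
    split at h
    · exact absurd h (by simp)
    · obtain rfl : q = 0 := by simpa using h.symm
      refine ⟨le_refl _, by assumption, ?_⟩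
      intro j hj hj'; omega
  | succ m ih =>
    intro q h
    simp only [pvScanPos] at h
    split at h
    · obtain ⟨h1, h2, h3⟩ := ih h
      refine ⟨by omega, h2, ?_⟩
      intro j hj hj'
      rcases Nat.lt_or_ge j (m+1) with h' | h'
      · exact h3 j hj (by omega)
      · have : j = m + 1 := by omega
        subst this; assumption
    · obtain rfl : q = m + 1 := by simpa using h.symm
      exact ⟨le_refl _, by assumption, by intro j hj hj'; omega⟩

theorem pv_scan_intro {n k : Nat} {c : List Nat} {q : Nat} :
    ∀ p, q ≤ p → c.getD q 0 ≠ n - k + q → (∀ j, q < j → j ≤ p → c.getD j 0 = n - k + j) →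
      pvScanPos n k c p = some q := by
  intro p
  induction p with
  | zero =>
    intro hq hne _
    obtain rfl : q = 0 := by omega
    simp only [pvScanPos]
    rw [if_neg hne]
  | succ m ih =>
    intro hq hne hmax
    simp only [pvScanPos]
    rcases Nat.lt_or_ge q (m+1) with h' | h'
    · rw [if_pos (hmax (m+1) h' (le_refl _))]
      exact ih (by omega) hne (fun j hj hj' => hmax j hj (by omega))
    · obtain rfl : q = m + 1 := by omega
      rw [if_neg hne]


theorem pv_succAt_length {c : List Nat} {pos : Nat} (h : pos ≤ c.length) :
    (pvSuccAt c pos).length = c.length := by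
  simp [pvSuccAt]; omega

theorem pv_succAt_getD {c : List Nat} {pos i : Nat} (hpos : pos ≤ c.length) (hi : i < c.length) :
    (pvSuccAt c pos).getD i 0 = if i < pos then c.getD i 0 else c.getD pos 0 + 1 + (i - pos) := by
  unfold pvSuccAt
  rcases Nat.lt_or_ge i pos with h | h
  · rw [if_pos h]
    rw [List.getD_append _ _ _ _ (by simp; omega)]
    rw [List.getD_eq_getElem _ _ (by simp; omega), List.getD_eq_getElem _ _ (by omega)]
    simp
  · rw [if_neg (by omega)]
    have hlt : pos ≤ i := h
    have h1 : (c.take pos).length = pos := by simp; omega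
    rw [List.getD_append_right _ _ _ _ (by omega)]
    rw [h1]
    rw [List.getD_eq_getElem _ _ (by simp; omega)]
    simp

def pvAux (c : List Nat) (pos m : Nat) : List Nat :=
  c.take pos ++ (List.range (m+1)).map (fun t => c.getD pos 0 + 1 + t) ++ c.drop (pos+1+m)

theorem pv_fold_run (c : List Nat) (pos : Nat) (hpos : pos < c.length) :
    ∀ m, pos + m < c.length →
      (List.range' (pos+1) m).foldl (fun c j => c.set j (c.getD (j-1) 0 + 1))
        (c.set pos (c.getD pos 0 + 1)) = pvAux c pos m := by
  intro m
  induction m with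
  | zero =>
    intro _
    simp only [List.range', List.foldl_nil, pvAux]
    rw [List.set_eq_take_cons_drop _ hpos]
    simp
  | succ m ih =>
    intro hm
    rw [List.range'_concat, List.foldl_append, ih (by omega)]
    simp only [List.foldl_cons, List.foldl_nil]
    have hmidlen : ((List.range (m+1)).map (fun t => c.getD pos 0 + 1 + t)).length = m + 1 := by simp
    have htlen : (c.take pos).length = pos := by simp; omega
    simp only [Nat.one_mul]
    have hidx : pos + 1 + m - 1 = pos + m := by omega
    rw [hidx]
    have hgd : (pvAux c pos m).getD (pos + m) 0 = c.getD pos 0 + 1 + m := by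
      unfold pvAux
      rw [List.append_assoc, List.getD_append_right _ _ _ _ (by rw [htlen]; omega)]
      rw [htlen, List.getD_append _ _ _ _ (by rw [hmidlen]; omega)]
      rw [List.getD_eq_getElem _ _ (by rw [hmidlen]; omega)]
      simp
    rw [hgd]
    unfold pvAux
    rw [List.append_assoc, List.set_append, if_neg (by rw [htlen]; omega), htlen]
    have : pos + 1 + m - pos = m + 1 := by omega
    rw [this]
    rw [List.set_append, if_neg (by rw [hmidlen]; omega), hmidlen]
    have : m + 1 - (m+1) = 0 := by omega
    rw [this]
    rw [List.drop_eq_getElem_cons (by omega : pos + 1 + m < c.length)]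
    simp only [List.set_cons_zero]
    rw [List.range_succ]
    simp only [List.map_append, List.map_cons, List.map_nil, List.append_assoc]
    have : pos + 1 + m + 1 = pos + 1 + (m+1) := by omega
    rw [this]
    simp [List.range_succ, List.append_assoc, Nat.add_assoc]

theorem pv_next_eq_succAt {n k : Nat} {c : List Nat} {pos : Nat} (hlen : c.length = k)
    (hk : 1 ≤ k) (hpos : pos < k) (hscan : pvScanPos n k c (k-1) = some pos) :
    pvNextCombo n k c = some (pvSuccAt c pos) := by
  unfold pvNextCombo
  rw [hscan]
  simp only
  rw [pv_fold_run c pos (by omega) (k - (pos+1)) (by omega)]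
  unfold pvAux pvSuccAt
  have h1 : pos + 1 + (k - (pos+1)) = c.length := by omega
  rw [h1, List.drop_length, List.append_nil]
  have h2 : k - (pos+1) + 1 = c.length - pos := by omega
  rw [h2]

theorem pv_pairwise_of_getD {c : List Nat}
    (h : ∀ i j, i < j → j < c.length → c.getD i 0 < c.getD j 0) : c.Pairwise (· < ·) := by
  rw [List.pairwise_iff_getElem]
  intro i j hi hj hij
  have := h i j hij hj
  rwa [List.getD_eq_getElem _ _ (by omega), List.getD_eq_getElem _ _ hj] at this

theorem pv_mem_getD {c : List Nat} {x : Nat} (hx : x ∈ c) : ∃ i, i < c.length ∧ c.getD i 0 = x := by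
  obtain ⟨i, hi, rfl⟩ := List.getElem_of_mem hx
  exact ⟨i, hi, List.getD_eq_getElem _ _ hi⟩

theorem pv_succAt_valid {n k : Nat} {c : List Nat} {pos : Nat} (hv : pvValid n k c)
    (hkn : k ≤ n) (hpos : pos < k) (hne : c.getD pos 0 ≠ n - k + pos) :
    pvValid n k (pvSuccAt c pos) := by
  obtain ⟨hlen, hp, hb⟩ := hv
  have hposlen : pos ≤ c.length := by omega
  have hplt : c.getD pos 0 < n - k + pos := by
    have := pv_valid_bound ⟨hlen, hp, hb⟩ hkn pos hpos
    omega
  have hgetD := fun (i : Nat) (hi : i < c.length) => pv_succAt_getD hposlen hi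
  have hlen' : (pvSuccAt c pos).length = c.length := pv_succAt_length hposlen
  refine ⟨by omega, ?_, ?_⟩
  · apply pv_pairwise_of_getD
    intro i j hij hj
    rw [hlen'] at hj
    rw [hgetD i (by omega), hgetD j hj]
    split <;> split
    · -- both in prefix
      have := pv_incr_getD hp i j (by omega) hj
      omega
    · -- i in prefix, j in run
      have := pv_incr_getD hp i pos (by omega) (by omega)
      omega
    · omega
    · omega
  · intro x hx
    obtain ⟨i, hi, rfl⟩ := pv_mem_getD hx
    rw [hlen'] at hi
    rw [hgetD i hi]
    split
    · apply hb
      rw [List.getD_eq_getElem _ _ hi]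
      exact List.getElem_mem hi
    · omega

theorem pv_enc_foldl (B : Nat) : ∀ (c : List Nat) (a0 : Nat),
    c.foldl (fun a d => a * B + d) a0 = a0 * B ^ c.length + pvEnc B c := by
  intro c
  induction c with
  | nil => intro a0; simp [pvEnc]
  | cons x c ih =>
    intro a0
    unfold pvEnc
    simp only [List.foldl_cons, Nat.zero_mul, Nat.zero_add]
    rw [ih (a0 * B + x), ih x]
    simp only [List.length_cons, pow_succ]
    ring

theorem pv_enc_lt (B : Nat) : ∀ (c : List Nat), (∀ x ∈ c, x < B) → pvEnc B c < B ^ c.length := by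
  intro c
  induction c with
  | nil => intro _; simp [pvEnc]
  | cons x c ih =>
    intro hb
    have hx : x < B := hb x (List.mem_cons_self ..)
    have hc := ih (fun y hy => hb y (List.mem_cons_of_mem _ hy))
    unfold pvEnc
    simp only [List.foldl_cons, Nat.zero_mul, Nat.zero_add]
    rw [pv_enc_foldl B c x]
    unfold pvEnc at hc
    simp only [List.length_cons]
    calc x * B ^ c.length + List.foldl (fun a d => a * B + d) 0 c
        < x * B ^ c.length + B ^ c.length := by omega
      _ = (x + 1) * B ^ c.length := by ring
      _ ≤ B * B ^ c.length := Nat.mul_le_mul_right _ (by omega)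
      _ = B ^ (c.length + 1) := by ring

theorem pv_enc_lt_of_lt_at {B : Nat} {a b : List Nat} {p : Nat}
    (hlen : a.length = b.length) (hp : p < a.length)
    (htake : a.take p = b.take p) (hlt : a.getD p 0 < b.getD p 0)
    (hdig : ∀ x ∈ a, x < B) : pvEnc B a < pvEnc B b := by
  have hpd : p < b.length := by omega
  have hc : a = a.take p ++ (a[p]'hp) :: a.drop (p+1) := by
    rw [← List.set_eq_take_cons_drop _ hp, List.set_getElem_self]
  have hd : b = b.take p ++ (b[p]'hpd) :: b.drop (p+1) := by
    rw [← List.set_eq_take_cons_drop _ hpd, List.set_getElem_self]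
  have hgc : a.getD p 0 = (a[p]'hp) := List.getD_eq_getElem _ _ hp
  have hgd : b.getD p 0 = (b[p]'hpd) := List.getD_eq_getElem _ _ hpd
  have hdiglt : ∀ x ∈ a.drop (p+1), x < B := fun x hx => hdig x (List.mem_of_mem_drop hx)
  have hBpos : 0 < B := by
    have := hdig (a[p]'hp) (List.getElem_mem hp)
    omega
  have hdroplen : (a.drop (p+1)).length = (b.drop (p+1)).length := by simp [hlen]
  conv_lhs => rw [hc]
  conv_rhs => rw [hd]
  unfold pvEnc
  rw [List.foldl_append, List.foldl_append, ← htake]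
  simp only [List.foldl_cons]
  rw [pv_enc_foldl B (a.drop (p+1)), pv_enc_foldl B (b.drop (p+1))]
  set A := List.foldl (fun a b => a * B + b) 0 (a.take p)
  have h1 : pvEnc B (a.drop (p+1)) < B ^ (a.drop (p+1)).length := pv_enc_lt B _ hdiglt
  rw [← hdroplen]
  have h2 : (A * B + (a[p]'hp)) + 1 ≤ A * B + (b[p]'hpd) := by omega
  calc (A * B + (a[p]'hp)) * B ^ (a.drop (p+1)).length + pvEnc B (a.drop (p+1))
      < (A * B + (a[p]'hp)) * B ^ (a.drop (p+1)).length + B ^ (a.drop (p+1)).length := by omega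
    _ = ((A * B + (a[p]'hp)) + 1) * B ^ (a.drop (p+1)).length := by ring
    _ ≤ (A * B + (b[p]'hpd)) * B ^ (a.drop (p+1)).length := Nat.mul_le_mul_right _ h2
    _ ≤ (A * B + (b[p]'hpd)) * B ^ (a.drop (p+1)).length + pvEnc B (b.drop (p+1)) := Nat.le_add_right _ _


-- the predecessor combination (inverse of pvSuccAt at a maximal free position)
def pvPredAt (n k : Nat) (g : List Nat) (p : Nat) : List Nat :=
  g.take p ++ (List.range (k - p)).map (fun t => if t = 0 then g.getD p 0 - 1 else n - k + (p + t))

-- position j of g is not at its lexicographically minimal value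
@[reducible] def pvFree (g : List Nat) (j : Nat) : Prop :=
  g.getD j 0 ≠ if j = 0 then 0 else g.getD (j-1) 0 + 1

theorem pv_eq_range_of_not_free {k : Nat} {g : List Nat} (hlen : g.length = k)
    (h : ∀ j, j < k → ¬ pvFree g j) : g = List.range k := by
  have key : ∀ j, j < k → g.getD j 0 = j := by
    intro j
    induction j with
    | zero =>
      intro hj
      have := h 0 hj
      unfold pvFree at this
      simpa using not_ne_iff.mp this
    | succ m ih =>
      intro hj
      have := h (m+1) hj
      unfold pvFree at this
      have h2 := not_ne_iff.mp this
      simp only [Nat.add_sub_cancel] at h2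
      rw [h2, ih (by omega)]
      simp
  apply List.ext_getElem (by simpa using hlen)
  intro i h1 h2
  have := key i (by omega)
  rw [List.getD_eq_getElem _ _ h1] at this
  simpa using this

theorem pv_predAt_length {n k : Nat} {g : List Nat} {p : Nat} (hlen : g.length = k) (hp : p < k) :
    (pvPredAt n k g p).length = k := by
  simp [pvPredAt]; omega

theorem pv_predAt_getD {n k : Nat} {g : List Nat} {p i : Nat} (hlen : g.length = k)
    (hp : p < k) (hi : i < k) :
    (pvPredAt n k g p).getD i 0 =
      if i < p then g.getD i 0 else if i = p then g.getD p 0 - 1 else n - k + i := by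
  unfold pvPredAt
  have htlen : (g.take p).length = p := by simp; omega
  rcases Nat.lt_or_ge i p with h | h
  · rw [if_pos h, List.getD_append _ _ _ _ (by omega)]
    rw [List.getD_eq_getElem _ _ (by omega), List.getD_eq_getElem _ _ (by omega)]
    simp
  · rw [if_neg (by omega), List.getD_append_right _ _ _ _ (by omega), htlen]
    rw [List.getD_eq_getElem _ _ (by simp; omega)]
    rcases Nat.eq_or_lt_of_le h with rfl | h'
    · simp
    · rw [if_neg (by omega)]
      simp only [List.getElem_map, List.getElem_range]
      rw [if_neg (by omega)]
      congr 1
      omega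

theorem pv_predAt_take {n k : Nat} {g : List Nat} {p : Nat} (hlen : g.length = k) (hp : p < k) :
    (pvPredAt n k g p).take p = g.take p := by
  unfold pvPredAt
  rw [List.take_append_of_le_length (by simp; omega)]
  simp

-- collected facts about a maximal free position
theorem pv_predAt_valid {n k : Nat} {g : List Nat} {p : Nat} (hv : pvValid n k g)
    (hk : 1 ≤ k) (hkn : k ≤ n) (hp : p < k)
    (hfree : pvFree g p) : pvValid n k (pvPredAt n k g p) := by
  obtain ⟨hlen, hpair, hb⟩ := hv
  have hbound := pv_valid_bound ⟨hlen, hpair, hb⟩ hkn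
  have hg1 : 1 ≤ g.getD p 0 := by
    unfold pvFree at hfree
    rcases Nat.eq_zero_or_pos p with rfl | hppos
    · simpa using Nat.pos_of_ne_zero (by simpa using hfree)
    · have := pv_incr_getD hpair (p-1) p (by omega) (by omega)
      omega
  have hprev : p ≠ 0 → g.getD (p-1) 0 + 2 ≤ g.getD p 0 := by
    intro hp0
    unfold pvFree at hfree
    rw [if_neg hp0] at hfree
    have := pv_incr_getD hpair (p-1) p (by omega) (by omega)
    omega
  have hgd := fun (i : Nat) (hi : i < k) => pv_predAt_getD (n := n) hlen hp hi
  have hlen' := pv_predAt_length (n := n) hlen hp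
  refine ⟨hlen', ?_, ?_⟩
  · apply pv_pairwise_of_getD
    intro i j hij hj
    rw [hlen'] at hj
    rw [hgd i (by omega), hgd j hj]
    by_cases h1 : i < p <;> by_cases h2 : j < p
    · rw [if_pos h1, if_pos h2]
      have := pv_incr_getD hpair i j (by omega) (by omega)
      omega
    · rw [if_pos h1, if_neg h2]
      by_cases h3 : j = p
      · rw [if_pos h3]
        have h4 := pv_incr_getD hpair i (p-1) (by omega) (by omega)
        have h5 := hprev (by omega)
        omega
      · rw [if_neg h3]
        have := hbound i (by omega)
        omega
    · omega
    · rw [if_neg h1, if_neg h2]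
      by_cases h3 : i = p
      · rw [if_pos h3, if_neg (by omega)]
        have h4 := hbound p hp
        omega
      · rw [if_neg h3, if_neg (by omega)]
        omega
  · intro x hx
    obtain ⟨i, hi, rfl⟩ := pv_mem_getD hx
    rw [hlen'] at hi
    rw [hgd i hi]
    have hgi : g.getD i 0 < n := by
      have h' : i < g.length := by omega
      rw [List.getD_eq_getElem _ _ h']
      exact hb _ (List.getElem_mem h')
    have hgp : g.getD p 0 < n := by
      have h' : p < g.length := by omega
      rw [List.getD_eq_getElem _ _ h']
      exact hb _ (List.getElem_mem h')
    split
    · exact hgi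
    · split
      · omega
      · omega

theorem pv_predAt_scan {n k : Nat} {g : List Nat} {p : Nat} (hv : pvValid n k g)
    (hk : 1 ≤ k) (hkn : k ≤ n) (hp : p < k) (hfree : pvFree g p) :
    pvScanPos n k (pvPredAt n k g p) (k-1) = some p := by
  obtain ⟨hlen, hpair, hb⟩ := hv
  have hbound := pv_valid_bound ⟨hlen, hpair, hb⟩ hkn
  have hg1 : 1 ≤ g.getD p 0 := by
    unfold pvFree at hfree
    rcases Nat.eq_zero_or_pos p with rfl | hppos
    · simpa using Nat.pos_of_ne_zero (by simpa using hfree)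
    · have := pv_incr_getD hpair (p-1) p (by omega) (by omega)
      omega
  have hgd := fun (i : Nat) (hi : i < k) => pv_predAt_getD (n := n) hlen hp hi
  apply pv_scan_intro
  · omega
  · rw [hgd p hp, if_neg (by omega), if_pos rfl]
    have := hbound p hp
    have hgp : g.getD p 0 ≤ n - k + p := this
    omega
  · intro j hj hj'
    rw [hgd j (by omega), if_neg (by omega), if_neg (by omega)]

theorem pv_succAt_predAt {n k : Nat} {g : List Nat} {p : Nat} (hv : pvValid n k g)
    (hk : 1 ≤ k) (hkn : k ≤ n) (hp : p < k) (hfree : pvFree g p)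
    (hmax : ∀ j, p < j → j < k → ¬ pvFree g j) :
    pvSuccAt (pvPredAt n k g p) p = g := by
  obtain ⟨hlen, hpair, hb⟩ := hv
  have hg1 : 1 ≤ g.getD p 0 := by
    unfold pvFree at hfree
    rcases Nat.eq_zero_or_pos p with rfl | hppos
    · simpa using Nat.pos_of_ne_zero (by simpa using hfree)
    · have := pv_incr_getD hpair (p-1) p (by omega) (by omega)
      omega
  have hcons : ∀ i, p ≤ i → i < k → g.getD i 0 = g.getD p 0 + (i - p) := by
    intro i
    induction i with
    | zero => intro h1 _; interval_cases p; simp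
    | succ m ih =>
      intro h1 h2
      rcases Nat.eq_or_lt_of_le h1 with h | h
      · rw [← h]; simp
      · have hnf := hmax (m+1) (by omega) h2
        unfold pvFree at hnf
        rw [if_neg (by omega)] at hnf
        have h3 := not_ne_iff.mp hnf
        simp only [Nat.add_sub_cancel] at h3
        rw [h3, ih (by omega) (by omega)]
        omega
  have hlenp := pv_predAt_length (n := n) hlen hp
  have hgd := fun (i : Nat) (hi : i < k) => pv_predAt_getD (n := n) hlen hp hi
  have hlens : (pvSuccAt (pvPredAt n k g p) p).length = k := by
    rw [pv_succAt_length (by omega)]; exact hlenp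
  apply List.ext_getElem (by omega)
  intro i h1 h2
  have hik : i < k := by omega
  have hsg := pv_succAt_getD (c := pvPredAt n k g p) (pos := p) (i := i) (by omega) (by omega)
  rw [← List.getD_eq_getElem _ 0 h1, ← List.getD_eq_getElem _ 0 h2, hsg]
  rcases Nat.lt_or_ge i p with hip | hip
  · rw [if_pos hip, hgd i hik, if_pos hip]
  · rw [if_neg (by omega), hgd p hp, if_neg (by omega), if_pos rfl, hcons i hip hik]
    omega

theorem pv_reach_snoc {n k : Nat} {t : Nat} {a b c : List Nat}
    (h : pvReach n k t a b) (hstep : pvNextCombo n k b = some c) :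
    pvReach n k (t+1) a c := by
  induction h with
  | refl d => exact pvReach.step hstep (pvReach.refl c)
  | step h1 _ ih => exact pvReach.step h1 (ih hstep)

theorem pv_reach_init {n k : Nat} (hk : 1 ≤ k) (hkn : k ≤ n) :
    ∀ (g : List Nat), pvValid n k g →
      ∃ t, pvReach n k t (List.range k) g ∧ t ≤ pvEnc (n+1) g := by
  suffices H : ∀ e g, pvValid n k g → pvEnc (n+1) g = e →
      ∃ t, pvReach n k t (List.range k) g ∧ t ≤ pvEnc (n+1) g by
    exact fun g hv => H _ g hv rfl
  intro e
  induction e using Nat.strong_induction_on with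
  | _ e ih =>
    intro g hv henc
    by_cases hinit : g = List.range k
    · subst hinit
      exact ⟨0, pvReach.refl _, Nat.zero_le _⟩
    · -- find the greatest free position
      have hlen : g.length = k := hv.1
      have hex : ∃ j, j < k ∧ pvFree g j := by
        by_contra hno
        refine hinit (pv_eq_range_of_not_free hlen ?_)
        intro j hj hf
        exact hno ⟨j, hj, hf⟩
      obtain ⟨j0, hj0k, hj0f⟩ := hex
      set p := Nat.findGreatest (fun j => pvFree g j) (k-1) with hpdef
      have hple : p ≤ k - 1 := Nat.findGreatest_le _
      have hpk : p < k := by omega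
      have hj0le : j0 ≤ p := Nat.le_findGreatest (by omega) hj0f
      have hpfree : pvFree g p := Nat.findGreatest_spec (by omega : j0 ≤ k - 1) hj0f
      have hmax : ∀ j, p < j → j < k → ¬ pvFree g j := by
        intro j hj hjk
        exact Nat.findGreatest_is_greatest hj (by omega)
      have hvc := pv_predAt_valid hv hk hkn hpk hpfree
      have hscanc := pv_predAt_scan hv hk hkn hpk hpfree
      have hsucc := pv_succAt_predAt hv hk hkn hpk hpfree hmax
      have hnext : pvNextCombo n k (pvPredAt n k g p) = some g := by
        rw [pv_next_eq_succAt hvc.1 hk hpk hscanc, hsucc]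
      have hencdec : pvEnc (n+1) (pvPredAt n k g p) < pvEnc (n+1) g := by
        have hg1 : 1 ≤ g.getD p 0 := by
          unfold pvFree at hpfree
          rcases Nat.eq_zero_or_pos p with hz | hppos
          · rw [hz] at hpfree ⊢
            simpa using Nat.pos_of_ne_zero (by simpa using hpfree)
          · have := pv_incr_getD hv.2.1 (p-1) p (by omega) (by omega)
            omega
        apply pv_enc_lt_of_lt_at (p := p)
        · rw [pv_predAt_length hlen hpk, hlen]
        · rw [pv_predAt_length hlen hpk]; exact hpk
        · exact pv_predAt_take hlen hpk
        · rw [pv_predAt_getD hlen hpk hpk, if_neg (by omega), if_pos rfl]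
          omega
        · intro x hx
          obtain ⟨i, hi, rfl⟩ := pv_mem_getD hx
          have hmem : (pvPredAt n k g p).getD i 0 ∈ pvPredAt n k g p := by
            rw [List.getD_eq_getElem _ _ hi]
            exact List.getElem_mem _
          have := hvc.2.2 _ hmem
          omega
      obtain ⟨t, hreach, hle⟩ := ih _ (by omega : pvEnc (n+1) (pvPredAt n k g p) < e) (pvPredAt n k g p) hvc rfl
      exact ⟨t + 1, pv_reach_snoc hreach hnext, by omega⟩


theorem pv_next_valid {n k : Nat} {c c' : List Nat} (hv : pvValid n k c)
    (hk : 1 ≤ k) (hkn : k ≤ n) (h : pvNextCombo n k c = some c') : pvValid n k c' := by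
  rcases hscan : pvScanPos n k c (k-1) with _ | pos
  · rw [pvNextCombo, hscan] at h; exact absurd h (by simp)
  · obtain ⟨hle, hne, _⟩ := pv_scan_some hscan
    have hpos : pos < k := by omega
    rw [pv_next_eq_succAt hv.1 hk hpos hscan] at h
    obtain rfl : pvSuccAt c pos = c' := by simpa using h
    exact pv_succAt_valid hv hkn hpos hne

theorem pv_loop_sound {required : List String} {d : PySem.Dict String (List String)}
    {tests : List String} {n k : Nat} (hk : 1 ≤ k) (hkn : k ≤ n) :
    ∀ (fuel : Nat) (c : List Nat), pvValid n k c →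
      pvLoopA required d tests n k fuel c = true →
      ∃ c', pvValid n k c' ∧
        PySem.Set.issubset required (c'.foldl (fun u idx => PySem.Set.union u (d.getD (tests.getD idx "") [])) PySem.Set.empty) = true := by
  intro fuel
  induction fuel with
  | zero => intro c _ h; exact absurd h (by simp [pvLoopA])
  | succ fuel ih =>
    intro c hv h
    rw [pvLoopA] at h
    by_cases htest : PySem.Set.issubset required
        (c.foldl (fun u idx => PySem.Set.union u (d.getD (tests.getD idx "") [])) PySem.Set.empty) = true
    · exact ⟨c, hv, htest⟩
    · rw [if_neg htest] at h
      rcases hnext : pvNextCombo n k c with _ | c'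
      · rw [hnext] at h; exact absurd h (by simp)
      · rw [hnext] at h
        exact ih c' (pv_next_valid hv hk hkn hnext) h

theorem pv_loop_complete {required : List String} {d : PySem.Dict String (List String)}
    {tests : List String} {n k : Nat} :
    ∀ (t : Nat) (c g : List Nat), pvReach n k t c g →
      PySem.Set.issubset required (g.foldl (fun u idx => PySem.Set.union u (d.getD (tests.getD idx "") [])) PySem.Set.empty) = true →
      ∀ fuel, t < fuel → pvLoopA required d tests n k fuel c = true := by
  intro t c g hreach
  induction hreach with
  | refl c =>
    intro htest fuel hfuel
    obtain ⟨fuel, rfl⟩ : ∃ f, fuel = f + 1 := ⟨fuel - 1, by omega⟩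
    rw [pvLoopA, if_pos htest]
  | step hnext htail ih =>
    intro htest fuel hfuel
    obtain ⟨fuel, rfl⟩ : ∃ f, fuel = f + 1 := ⟨fuel - 1, by omega⟩
    rw [pvLoopA]
    split
    · rfl
    · rw [hnext]
      exact ih htest fuel (by omega)

-- stage k succeeds iff some valid k-combination covers
theorem pv_stage_iff {required : List String} {d : PySem.Dict String (List String)}
    {tests : List String} {sets : List (List String)} {n k : Nat} (hk : 1 ≤ k) (hkn : k ≤ n)
    (hset : ∀ idx, idx < n → d.getD (tests.getD idx "") [] = sets.getD idx []) :
    pvLoopA required d tests n k ((n+1)^k) (List.range k) = true ↔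
      ∃ c, pvValid n k c ∧ pvCovIdx required sets c := by
  have hbridge : ∀ c : List Nat, (∀ i ∈ c, i < n) →
      (PySem.Set.issubset required (c.foldl (fun u idx => PySem.Set.union u (d.getD (tests.getD idx "") [])) PySem.Set.empty) = true
        ↔ pvCovIdx required sets c) := by
    intro c hc
    rw [PySem.Set.issubset_iff]
    unfold pvCovIdx
    constructor
    · intro h x hx
      obtain h' := h x hx
      rw [pv_mem_foldl_union] at h'
      rcases h' with h' | ⟨i, hi, hxi⟩
      · exact absurd h' (by simp [PySem.Set.empty])
      · exact ⟨i, hi, by rwa [hset i (hc i hi)] at hxi⟩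
    · intro h x hx
      obtain ⟨i, hi, hxi⟩ := h x hx
      rw [pv_mem_foldl_union]
      exact Or.inr ⟨i, hi, by rwa [hset i (hc i hi)]⟩
  constructor
  · intro h
    have hvinit : pvValid n k (List.range k) := by
      refine ⟨by simp, List.pairwise_lt_range, ?_⟩
      intro x hx
      rw [List.mem_range] at hx
      omega
    obtain ⟨c', hv', htest⟩ := pv_loop_sound hk hkn _ _ hvinit h
    exact ⟨c', hv', (hbridge c' hv'.2.2).mp htest⟩
  · rintro ⟨c, hv, hcov⟩
    obtain ⟨t, hreach, ht⟩ := pv_reach_init hk hkn c hv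
    have henc : pvEnc (n+1) c < (n+1)^k := by
      have := pv_enc_lt (n+1) c (fun x hx => by have := hv.2.2 x hx; omega)
      rwa [hv.1] at this
    exact pv_loop_complete t _ c hreach ((hbridge c hv.2.2).mpr hcov) _ (by omega)


theorem pv_map_getD_sublist {α : Type} (dflt : α) :
    ∀ (l : List α) (c : List Nat), c.Pairwise (· < ·) → (∀ x ∈ c, x < l.length) →
      (c.map (fun i => l.getD i dflt)).Sublist l := by
  intro l
  induction l with
  | nil =>
    intro c _ hb
    rcases c with _ | ⟨i, c⟩
    · simp
    · exact absurd (hb i (List.mem_cons_self ..)) (by simp)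
  | cons a l ih =>
    intro c hp hb
    rcases c with _ | ⟨i, c⟩
    · simp
    · rcases Nat.eq_zero_or_pos i with rfl | hipos
      · simp only [List.map_cons, List.getD_cons_zero]
        apply List.Sublist.cons₂
        have hpos : ∀ x ∈ c, 1 ≤ x := by
          intro x hx
          have := (List.pairwise_cons.mp hp).1 x hx
          omega
        have : c.map (fun i => (a :: l).getD i dflt) = (c.map (· - 1)).map (fun i => l.getD i dflt) := by
          rw [List.map_map]
          apply List.map_congr_left
          intro x hx
          have h1 := hpos x hx
          simp only [Function.comp]
          rcases x with _ | x
          · omega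
          · simp
        rw [this]
        apply ih
        · rw [List.pairwise_map]
          apply (List.pairwise_cons.mp hp).2.imp_of_mem
          intro x y hx hy hxy
          have := hpos x hx
          have := hpos y hy
          omega
        · intro x hx
          obtain ⟨y, hy, rfl⟩ := List.mem_map.mp hx
          have h2 := hb y (List.mem_cons_of_mem _ hy)
          have h3 := hpos y hy
          simp only [List.length_cons] at h2
          omega
      · -- every index ≥ 1: skip the head
        apply List.Sublist.cons
        have hpos : ∀ x ∈ i :: c, 1 ≤ x := by
          intro x hx
          rcases List.mem_cons.mp hx with rfl | hx'
          · omega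
          · have := (List.pairwise_cons.mp hp).1 x hx'
            omega
        have : (i :: c).map (fun j => (a :: l).getD j dflt) = ((i :: c).map (· - 1)).map (fun j => l.getD j dflt) := by
          rw [List.map_map]
          apply List.map_congr_left
          intro x hx
          have h1 := hpos x hx
          simp only [Function.comp]
          rcases x with _ | x
          · omega
          · simp
        rw [this]
        apply ih
        · rw [List.pairwise_map]
          apply hp.imp_of_mem
          intro x y hx hy hxy
          have := hpos x hx
          have := hpos y hy
          omega
        · intro x hx
          obtain ⟨y, hy, rfl⟩ := List.mem_map.mp hx
          have h2 := hb y hy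
          have h3 := hpos y hy
          simp only [List.length_cons] at h2
          omega

theorem pv_combo_iff_sublist {required : List String} {sets : List (List String)} {k : Nat} :
    (∃ c, pvValid sets.length k c ∧ pvCovIdx required sets c) ↔
      (∃ S, S.Sublist sets ∧ S.length = k ∧ pvCovBy required [] S) := by
  constructor
  · rintro ⟨c, ⟨hlen, hp, hb⟩, hcov⟩
    refine ⟨c.map (fun i => sets.getD i []), pv_map_getD_sublist [] sets c hp hb, by simpa using hlen, ?_⟩
    intro x hx
    obtain ⟨i, hi, hxi⟩ := hcov x hx
    exact Or.inr ⟨sets.getD i [], List.mem_map_of_mem hi, hxi⟩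
  · rintro ⟨S, hsub, hlen, hcov⟩
    obtain ⟨is, hS, hpis⟩ := List.sublist_eq_map_getElem hsub
    refine ⟨is.map (·.val), ⟨by simp [← hlen, hS], ?_, ?_⟩, ?_⟩
    · rw [List.pairwise_map]
      exact hpis.imp (fun h => h)
    · intro x hx
      obtain ⟨y, _, rfl⟩ := List.mem_map.mp hx
      exact y.isLt
    · intro x hx
      rcases hcov x hx with h | ⟨s, hs, hxs⟩
      · exact absurd h (by simp)
      · rw [hS] at hs
        obtain ⟨j, hj, rfl⟩ := List.mem_map.mp hs
        refine ⟨j.val, List.mem_map_of_mem hj, ?_⟩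
        rw [List.getD_eq_getElem _ _ j.isLt]
        exact hxs

theorem pv_best_le {required : List String} {ntot : Nat} :
    ∀ (ss : List (List String)) (u : PySem.Set String),
      pvBest required ntot ss u ≤ (ntot : Int) + 1 := by
  intro ss
  induction ss with
  | nil =>
    intro u
    rw [pvBest]
    split
    · omega
    · omega
  | cons s ss ih =>
    intro u
    rw [pvBest]
    split
    · omega
    · simp only
      split
      · exact ih u
      · have h1 := ih (PySem.Set.union u s)
        have h2 := ih u
        omega

theorem pv_best_min {required : List String} {ntot : Nat} :
    ∀ (ss : List (List String)) (u : PySem.Set String) (S : List (List String)),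
      S.Sublist ss → pvCovBy required u S →
      pvBest required ntot ss u ≤ (S.length : Int) := by
  intro ss
  induction ss with
  | nil =>
    intro u S hsub hcov
    rw [List.sublist_nil.mp hsub] at hcov
    rw [pvBest, if_pos ?_]
    · simp
    · rw [PySem.Set.issubset_iff]
      intro x hx
      rcases hcov x hx with h | ⟨s, hs, _⟩
      · exact h
      · exact absurd hs (by simp)
  | cons a ss ih =>
    intro u S hsub hcov
    rw [pvBest]
    split
    · exact Int.natCast_nonneg _
    · simp only
      cases hsub with
      | cons _ h =>
        have h1 := ih u S h hcov
        split <;> omega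
      | cons₂ _ h =>
        rename_i S'
        have hcov' : pvCovBy required (PySem.Set.union u a) S' := by
          intro x hx
          rcases hcov x hx with hxu | ⟨s, hs, hxs⟩
          · exact Or.inl ((PySem.Set.mem_union u a x).mpr (Or.inl hxu))
          · rcases List.mem_cons.mp hs with hsa | hs'
            · exact Or.inl ((PySem.Set.mem_union u a x).mpr (Or.inr (hsa ▸ hxs)))
            · exact Or.inr ⟨s, hs', hxs⟩
        have h1 := ih (PySem.Set.union u a) S' h hcov'
        simp only [List.length_cons]
        push_cast
        split <;> omega

theorem pv_best_attained {required : List String} {ntot : Nat} :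
    ∀ (ss : List (List String)) (u : PySem.Set String),
      pvBest required ntot ss u = (ntot : Int) + 1 ∨
      ∃ S, S.Sublist ss ∧ pvCovBy required u S ∧ pvBest required ntot ss u = (S.length : Int) := by
  intro ss
  induction ss with
  | nil =>
    intro u
    rw [pvBest]
    split
    · rename_i htest
      right
      refine ⟨[], List.Sublist.refl _, ?_, by simp⟩
      intro x hx
      exact Or.inl ((PySem.Set.issubset_iff _ _).mp htest x hx)
    · left; rfl
  | cons a ss ih =>
    intro u
    rw [pvBest]
    split
    · rename_i htest
      right
      refine ⟨[], List.nil_sublist _, ?_, by simp⟩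
      intro x hx
      exact Or.inl ((PySem.Set.issubset_iff _ _).mp htest x hx)
    · simp only
      split
      · rename_i hle
        rcases ih u with h | ⟨S, hsub, hcov, heq⟩
        · left; exact h
        · right; exact ⟨S, hsub.cons _, hcov, heq⟩
      · rename_i hgt
        rcases ih (PySem.Set.union u a) with h | ⟨S, hsub, hcov, heq⟩
        · exfalso
          have h1 := pv_best_le (required := required) (ntot := ntot) ss u
          omega
        · right
          refine ⟨a :: S, hsub.cons₂ _, ?_, ?_⟩
          · intro x hx
            rcases hcov x hx with hxu | ⟨s, hs, hxs⟩
            · rcases (PySem.Set.mem_union u a x).mp hxu with h' | h'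
              · exact Or.inl h'
              · exact Or.inr ⟨a, List.mem_cons_self .., h'⟩
            · exact Or.inr ⟨s, List.mem_cons_of_mem _ hs, hxs⟩
          · simp only [List.length_cons]
            push_cast
            omega


-- ===== outer loop =====
theorem pv_outer_none {required : List String} {d : PySem.Dict String (List String)}
    {tests : List String} {n : Nat} :
    ∀ ks, (∀ j ∈ ks, pvLoopA required d tests n j ((n+1)^j) (List.range j) = false) →
      pvOuterA required d tests n ks = (n : Int) + 1 := by
  intro ks
  induction ks with
  | nil => intro _; rfl
  | cons k ks ih =>
    intro h
    rw [pvOuterA, if_neg (by rw [h k (List.mem_cons_self ..)]; simp)]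
    exact ih (fun j hj => h j (List.mem_cons_of_mem _ hj))

theorem pv_outer_first {required : List String} {d : PySem.Dict String (List String)}
    {tests : List String} {n m : Nat} :
    ∀ ks1 ks2, (∀ j ∈ ks1, pvLoopA required d tests n j ((n+1)^j) (List.range j) = false) →
      pvLoopA required d tests n m ((n+1)^m) (List.range m) = true →
      pvOuterA required d tests n (ks1 ++ m :: ks2) = (m : Int) := by
  intro ks1
  induction ks1 with
  | nil =>
    intro ks2 _ htrue
    rw [List.nil_append, pvOuterA, if_pos htrue]
  | cons k ks ih =>
    intro ks2 h htrue
    rw [List.cons_append, pvOuterA, if_neg (by rw [h k (List.mem_cons_self ..)]; simp)]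
    exact ih ks2 (fun j hj => h j (List.mem_cons_of_mem _ hj)) htrue

theorem pv_outer_pos {required : List String} {d : PySem.Dict String (List String)}
    {tests : List String} {n : Nat} :
    ∀ ks, (∀ j ∈ ks, 1 ≤ j) → 1 ≤ pvOuterA required d tests n ks := by
  intro ks
  induction ks with
  | nil => intro _; rw [pvOuterA]; omega
  | cons k ks ih =>
    intro h
    rw [pvOuterA]
    split
    · have := h k (List.mem_cons_self ..)
      omega
    · exact ih (fun j hj => h j (List.mem_cons_of_mem _ hj))

-- B returns 0 as soon as required is empty
theorem pv_best_empty_req (ntot : Nat) (sets : List (List String)) (u : PySem.Set String) :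
    pvBest [] ntot sets u = 0 := by
  have h : PySem.Set.issubset ([] : List String) u = true :=
    (PySem.Set.issubset_iff _ _).mpr (by simp)
  cases sets with
  | nil => rw [pvBest, if_pos h]
  | cons a ss => rw [pvBest, if_pos h]

-- the list of stage sizes 1..n, split at the answer m
theorem pv_ks_split (n m : Nat) (h1 : 1 ≤ m) (h2 : m ≤ n) :
    (List.range n).map (· + 1) = List.range' 1 (m-1) ++ m :: List.range' (m+1) (n-m) := by
  have e1 : (List.range n).map (· + 1) = List.range' 1 n := by
    rw [List.range'_eq_map_range]
    apply List.map_congr_left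
    intro x _
    omega
  rw [e1]
  have e2 : List.range' m (n-m+1) = m :: List.range' (m+1) (n-m) := by
    rw [show n - m + 1 = (n-m) + 1 from rfl]
    rw [List.range'_succ]
  rw [← e2]
  have e3 : List.range' 1 (m-1) ++ List.range' (1 + 1 * (m-1)) (n-m+1) = List.range' 1 ((m-1) + (n-m+1)) :=
    List.range'_append
  rw [show (1 : Nat) + 1 * (m-1) = m from by omega] at e3
  rw [e3, show (m-1) + (n-m+1) = n from by omega]

-- ===== VERDICT (by name: the statement is the Claim_ definition above) =====
theorem solve_min_set_cover_size_py_spec : Claim_unchanged_solve_min_set_cover_size_py := by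
  intro required cover_map _
  intro hnd
  have hreq : required ≠ [] := fun h => hnd h
  show solve_min_set_cover_size_py required cover_map = solve_min_set_cover_size_py_alt required cover_map
  have hA : solve_min_set_cover_size_py required cover_map
      = pvOuterA required (PySem.Dict.ofList cover_map) (PySem.Dict.ofList cover_map).keys
          (PySem.Dict.ofList cover_map).keys.length
          ((List.range (PySem.Dict.ofList cover_map).keys.length).map (· + 1)) := rfl
  have hB : solve_min_set_cover_size_py_alt required cover_map
      = pvBest required (PySem.Dict.ofList cover_map).values.length
          (PySem.Dict.ofList cover_map).values PySem.Set.empty := rfl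
  rw [hA, hB]
  set d := PySem.Dict.ofList cover_map with hd
  set n := d.keys.length with hn
  have hnv : d.values.length = n := (pv_keys_values_length d).symm
  have hset : ∀ idx, idx < n → d.getD (d.keys.getD idx "") [] = d.values.getD idx [] :=
    fun idx h => pv_getset_eq cover_map idx h
  have hstage : ∀ k, 1 ≤ k → k ≤ n →
      (pvLoopA required d d.keys n k ((n+1)^k) (List.range k) = true ↔
        ∃ S, S.Sublist d.values ∧ S.length = k ∧ pvCovBy required [] S) := by
    intro k h1 h2
    rw [pv_stage_iff h1 h2 hset]
    rw [show n = d.values.length from hnv.symm]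
    exact pv_combo_iff_sublist
  rcases pv_best_attained (required := required) (ntot := d.values.length)
      d.values PySem.Set.empty with hbest | ⟨S, hsub, hcov, hbest⟩
  · -- infeasible: both sides return n+1
    rw [hbest, hnv]
    apply pv_outer_none
    intro j hj
    obtain ⟨i, hi, rfl⟩ := List.mem_map.mp hj
    rw [List.mem_range] at hi
    by_contra hT
    rw [Bool.not_eq_false] at hT
    obtain ⟨S, hsub, hlenS, hcovS⟩ := (hstage (i+1) (by omega) (by omega)).mp hT
    have hle := pv_best_min (required := required) (ntot := d.values.length)
        d.values PySem.Set.empty S hsub hcovS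
    rw [hbest, hlenS] at hle
    have := hsub.length_le
    omega
  · -- feasible: both sides return |S| for B's minimal covering sublist S
    have hm1 : 1 ≤ S.length := by
      rcases S with _ | ⟨s, S'⟩
      · obtain ⟨x, hx⟩ := List.exists_mem_of_ne_nil required hreq
        rcases hcov x hx with h | ⟨s, hs, _⟩
        · exact absurd h (by simp [PySem.Set.empty])
        · exact absurd hs (by simp)
      · simp
    have hmn : S.length ≤ n := by
      have := hsub.length_le
      omega
    have hTm : pvLoopA required d d.keys n S.length ((n+1)^S.length) (List.range S.length) = true :=
      (hstage S.length hm1 hmn).mpr ⟨S, hsub, rfl, hcov⟩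
    have hFj : ∀ j ∈ List.range' 1 (S.length - 1),
        pvLoopA required d d.keys n j ((n+1)^j) (List.range j) = false := by
      intro j hj
      rw [List.mem_range'_1] at hj
      by_contra hT
      rw [Bool.not_eq_false] at hT
      obtain ⟨S', hsub', hlenS', hcovS'⟩ := (hstage j (by omega) (by omega)).mp hT
      have hle := pv_best_min (required := required) (ntot := d.values.length)
          d.values PySem.Set.empty S' hsub' hcovS'
      rw [hbest, hlenS'] at hle
      have : S.length ≤ j := by exact_mod_cast hle
      omega
    rw [hbest, pv_ks_split n S.length hm1 hmn]
    exact pv_outer_first _ _ hFj hTm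

theorem solve_min_set_cover_size_py_changed : Claim_changed_solve_min_set_cover_size_py := by
  unfold Claim_changed_solve_min_set_cover_size_py; decide

theorem solve_min_set_cover_size_py_tight : Claim_exact_solve_min_set_cover_size_py := by
  intro required cover_map _ hD
  have hreq : required = [] := hD
  subst hreq
  have hA : 1 ≤ solve_min_set_cover_size_py [] cover_map := by
    apply pv_outer_pos
    intro j hj
    obtain ⟨i, _, rfl⟩ := List.mem_map.mp hj
    omega
  have hB : solve_min_set_cover_size_py_alt [] cover_map = 0 :=
    pv_best_empty_req _ _ _
  omega
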